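-- pv_equiv track=rewrite | github.com/Rubal0990/GFG-DSA | The Bit Game - GFG/the-bit-game.py | swapBitGame
-- ===== SOURCE A (Python) =====
-- def swapBitGame (N):
--     o = 0
--     xo = 0
--
--     while N:
--         if N%2 and o:
--             xo ^= o
--
--         if N%2 == 0:
--             o += 1
--
--         N //= 2
--
--     return 1 if xo else 2
-- ===== SOURCE B (Python) =====
-- def swapBitGame(N):
--     s = bin(N)[2:]
--     xo = 0
--     for i, c in enumerate(s):
--         if c == '1':
--             xo ^= s[i+1:].count('0')
--     return 1 if xo else 2
-- ===== Notes on version B (the rewrite author's own statement) =====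
-- stated objective: alternative
-- what changed: B works on the MSB-first binary string of N, recounting the zeros to the right of each set bit per slice, instead of A's LSB-first division loop threading a running zero counter; the redundant 'and o' guard disappears since XOR with 0 is a no-op.
import Mathlib
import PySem

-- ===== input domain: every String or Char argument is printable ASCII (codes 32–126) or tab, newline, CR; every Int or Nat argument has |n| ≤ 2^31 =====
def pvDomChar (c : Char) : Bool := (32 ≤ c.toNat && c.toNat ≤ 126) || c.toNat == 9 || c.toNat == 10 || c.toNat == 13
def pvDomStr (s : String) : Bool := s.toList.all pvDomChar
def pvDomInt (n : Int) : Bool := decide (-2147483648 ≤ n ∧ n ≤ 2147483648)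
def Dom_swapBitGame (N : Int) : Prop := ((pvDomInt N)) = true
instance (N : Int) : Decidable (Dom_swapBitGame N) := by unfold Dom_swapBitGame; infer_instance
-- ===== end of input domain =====

-- B re-implements the game on the MSB-first binary string of N, recounting the zeros to the
-- right of each set bit, instead of A's LSB-first division loop with a running zero counter
-- (objective: alternative decomposition, same result).

-- ===== PORT A =====
-- A's while loop, LSB first.  The loop state (N, o, xo) is carried as Nats: exact for the
-- admitted inputs N ≥ 0 (Pre_); the Python loop does not terminate for N < 0.
def swapBitGameLoop (n o xo : Nat) : Int :=
  if n = 0 then (if xo ≠ 0 then 1 else 2)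
  else swapBitGameLoop (n / 2)
        (if n % 2 = 0 then o + 1 else o)
        (if n % 2 = 1 ∧ o ≠ 0 then xo ^^^ o else xo)
  decreasing_by exact Nat.div_lt_self (Nat.pos_of_ne_zero (by assumption)) (by norm_num)

def swapBitGame (N : Int) : Int := swapBitGameLoop N.toNat 0 0

-- ===== PORT B =====
-- the binary digits of n > 0, MSB first
def pyBinDigits (n : Nat) : List Char :=
  if n = 0 then []
  else pyBinDigits (n / 2) ++ [if n % 2 = 1 then '1' else '0']
  decreasing_by exact Nat.div_lt_self (Nat.pos_of_ne_zero (by assumption)) (by norm_num)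

-- Python's bin(N): "0b…" for N ≥ 0 (bin(0) = "0b0"), "-0b…" for N < 0
def pyBin (N : Int) : List Char :=
  if N < 0 then '-' :: '0' :: 'b' :: pyBinDigits (-N).toNat
  else '0' :: 'b' :: (if N.toNat = 0 then ['0'] else pyBinDigits N.toNat)

-- the for-loop over enumerate(s): at position i the remaining suffix `rest` is s[i+1:]
def swapBitGameAltLoop : List Char → Nat → Nat
  | [], xo => xo
  | c :: rest, xo => swapBitGameAltLoop rest (if c = '1' then xo ^^^ rest.count '0' else xo)

def swapBitGame_alt (N : Int) : Int :=
  let s : List Char := (pyBin N).drop 2   -- bin(N)[2:]; the slice [2:] is exactly List.drop 2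
  if swapBitGameAltLoop s 0 ≠ 0 then 1 else 2

-- ===== PRECONDITION & SPEC =====
-- Pre_ excludes N < 0, on which Python A's while loop never terminates (N //= 2 stalls at -1).
def Pre_swapBitGame (N : Int) : Prop := 0 ≤ N
instance (N : Int) : Decidable (Pre_swapBitGame N) := by unfold Pre_swapBitGame; infer_instance
def pvWitness_swapBitGame : Int := (5)

def Spec_swapBitGame (N : Int) (out : Int) : Prop := out = swapBitGame_alt N
instance (N : Int) (out : Int) : Decidable (Spec_swapBitGame N out) := by unfold Spec_swapBitGame; infer_instance

-- ===== CLAIM (what is proved, stated in full; the proofs are below) =====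
def Claim_equal_swapBitGame : Prop := ∀ (N : Int), Dom_swapBitGame N → Pre_swapBitGame N → Spec_swapBitGame N (swapBitGame N)

-- ===== LEMMAS AND PROOFS =====

-- XOR over the set bits of s (MSB first) of (number of '0's to the right + offset o)
def gk : List Char → Nat → Nat
  | [], _ => 0
  | c :: rest, o => (if c = '1' then rest.count '0' + o else 0) ^^^ gk rest o

theorem altLoop_eq_gk (s : List Char) : ∀ xo : Nat, swapBitGameAltLoop s xo = xo ^^^ gk s 0 := by
  induction s with
  | nil => intro xo; simp [swapBitGameAltLoop, gk]
  | cons c rest ih =>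
    intro xo
    simp only [swapBitGameAltLoop, gk, ih]
    by_cases h : c = '1' <;> simp [h, Nat.xor_assoc]

theorem gk_append_single (c : Char) : ∀ (s : List Char) (o : Nat),
    gk (s ++ [c]) o = (if c = '1' then o else 0) ^^^ gk s (if c = '0' then o + 1 else o) := by
  intro s
  induction s with
  | nil => intro o; simp [gk]
  | cons d rest ih =>
    intro o
    simp only [List.cons_append, gk, ih]
    have hc : (rest ++ [c]).count '0' = rest.count '0' + (if c = '0' then 1 else 0) := by
      by_cases h : c = '0' <;> simp [h, List.count_append]
    rw [hc]
    by_cases h0 : c = '0' <;> by_cases h1 : c = '1' <;> by_cases hd : d = '1' <;>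
      simp [h0, h1, hd, Nat.xor_assoc, Nat.xor_comm] <;> omega

-- A's accumulated xor value, as a pure function of the remaining n and the zero counter o
def fA (n o : Nat) : Nat :=
  if n = 0 then 0
  else (if n % 2 = 1 then o else 0) ^^^ fA (n / 2) (if n % 2 = 0 then o + 1 else o)
  decreasing_by exact Nat.div_lt_self (Nat.pos_of_ne_zero (by assumption)) (by norm_num)

theorem loopA_eq_fA (n : Nat) : ∀ o xo : Nat,
    swapBitGameLoop n o xo = (if xo ^^^ fA n o ≠ 0 then 1 else 2) := by
  induction n using Nat.strong_induction_on with
  | _ n ih =>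
    intro o xo
    by_cases h : n = 0
    · simp [swapBitGameLoop, fA, h]
    · rw [swapBitGameLoop, fA, if_neg h, if_neg h,
        ih (n / 2) (Nat.div_lt_self (Nat.pos_of_ne_zero h) (by norm_num))]
      rcases Nat.mod_two_eq_zero_or_one n with hm | hm
      · simp [hm]
      · by_cases ho : o = 0 <;> simp [hm, ho, Nat.xor_assoc]

theorem fA_eq_gk (n : Nat) : ∀ o : Nat, fA n o = gk (pyBinDigits n) o := by
  induction n using Nat.strong_induction_on with
  | _ n ih =>
    intro o
    by_cases h : n = 0
    · simp [fA, pyBinDigits, gk, h]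
    · rw [fA, pyBinDigits, if_neg h, if_neg h, gk_append_single,
        ← ih (n / 2) (Nat.div_lt_self (Nat.pos_of_ne_zero h) (by norm_num))]
      rcases Nat.mod_two_eq_zero_or_one n with hm | hm <;> simp [hm]

-- ===== VERDICT (by name: the statement is the Claim_ definition above) =====
theorem swapBitGame_spec : Claim_equal_swapBitGame := by
  intro N _ hpre
  have hneg : ¬ N < 0 := not_lt.mpr hpre
  unfold Spec_swapBitGame swapBitGame swapBitGame_alt pyBin
  rw [loopA_eq_fA, fA_eq_gk]
  by_cases h : N.toNat = 0
  · simp [h, hneg, pyBinDigits, gk, swapBitGameAltLoop]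
  · simp [h, hneg, altLoop_eq_gk]
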